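-- pv_equiv track=rewrite | github.com/alenisaw/it-ner-peft-compression | src/data.py | build_entity_map_from_labels
-- ===== SOURCE A (Python) =====
-- from typing import Any, Dict, Iterable, List, Optional, Tuple, Union
--
-- def build_entity_map_from_labels(labels: List[str]) -> Dict[str, str]:
--     software_kw = {
--         "application", "app", "software", "tool", "library", "framework", "package",
--         "language", "programminglanguage", "ide", "editor", "browser",
--         "database", "db", "sql", "nosql",
--         "service", "cloud", "aws", "azure", "gcp",
--         "kubernetes", "docker", "container",
--         "api", "sdk", "platform", "runtime",
--         "server", "client",
--         "protocol", "http", "https", "tcp", "udp", "ssh", "ssl", "tls",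
--         "repo", "repository", "git", "github",
--     }
--     os_kw = {"operatingsystem", "os", "windows", "linux", "ubuntu", "debian", "macos", "android", "ios"}
--     hardware_kw = {"hardware", "device", "router", "switch", "cpu", "gpu", "disk", "ssd", "hdd", "ram", "laptop"}
--     error_kw = {"error", "exception", "bug", "crash", "failure", "timeout", "stacktrace", "traceback"}
--     version_kw = {"version", "release", "update", "patch", "build", "kb", "rc"}
--
--     def norm(s: str) -> str:
--         return s.strip().lower().replace("_", "").replace("-", "").replace(" ", "")
--
--     def choose_entity(base: str) -> str:
--         b = norm(base)
--         if any(k in b for k in os_kw):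
--             return "OS"
--         if any(k in b for k in error_kw):
--             return "ERROR"
--         if any(k in b for k in version_kw):
--             return "VERSION"
--         if any(k in b for k in hardware_kw):
--             return "HARDWARE"
--         if any(k in b for k in software_kw):
--             return "SOFTWARE"
--         return "O"
--
--     mapping: Dict[str, str] = {}
--     for lab in labels:
--         lab = str(lab)
--         if lab == "O":
--             mapping[lab] = "O"
--             continue
--         if lab.startswith(("B-", "I-")) and len(lab) > 2:
--             pref = lab[:2]
--             base = lab[2:]
--             ent = choose_entity(base)
--             mapping[lab] = "O" if ent == "O" else f"{pref}{ent}"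
--         else:
--             ent = choose_entity(lab)
--             mapping[lab] = "O" if ent == "O" else f"B-{ent}"
--     return mapping
-- ===== SOURCE B (Python) =====
-- # Different algorithm: instead of scanning every keyword for a substring hit, index all
-- # keywords in one hash map and enumerate the (bounded-length) substrings of the normalized
-- # base, collecting (priority, entity) hits and taking the minimum-priority one.
--
-- _CATS = (
--     ("OS", ("operatingsystem", "os", "windows", "linux", "ubuntu", "debian", "macos", "android", "ios")),
--     ("ERROR", ("error", "exception", "bug", "crash", "failure", "timeout", "stacktrace", "traceback")),
--     ("VERSION", ("version", "release", "update", "patch", "build", "kb", "rc")),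
--     ("HARDWARE", ("hardware", "device", "router", "switch", "cpu", "gpu", "disk", "ssd", "hdd", "ram", "laptop")),
--     ("SOFTWARE", (
--         "application", "app", "software", "tool", "library", "framework", "package",
--         "language", "programminglanguage", "ide", "editor", "browser",
--         "database", "db", "sql", "nosql",
--         "service", "cloud", "aws", "azure", "gcp",
--         "kubernetes", "docker", "container",
--         "api", "sdk", "platform", "runtime",
--         "server", "client",
--         "protocol", "http", "https", "tcp", "udp", "ssh", "ssl", "tls",
--         "repo", "repository", "git", "github",
--     )),
-- )
--
-- _KW = {k: (p, ent) for p, (ent, kws) in enumerate(_CATS) for k in kws}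
-- _MAXKW = 19  # == max(len(k) for k in _KW) ("programminglanguage")
--
--
-- def _classify(b):
--     hits = []
--     for i in range(len(b)):
--         for L in range(1, _MAXKW + 1):
--             h = _KW.get(b[i:i + L])
--             if h is not None:
--                 hits.append(h)
--     if not hits:
--         return "O"
--     return min(hits, key=lambda h: h[0])[1]
--
--
-- def _tag(lab):
--     if lab == "O":
--         return "O"
--     if (lab.startswith("B-") or lab.startswith("I-")) and len(lab) > 2:
--         pref, base = lab[:2], lab[2:]
--     else:
--         pref, base = "B-", lab
--     b = base.strip().lower().replace("_", "").replace("-", "").replace(" ", "")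
--     ent = _classify(b)
--     return "O" if ent == "O" else pref + ent
--
--
-- def build_entity_map_from_labels(labels):
--     return {lab: _tag(lab) for lab in map(str, labels)}
-- ===== Notes on version B (the rewrite author's own statement) =====
-- stated objective: alternative
-- what changed: Inverts the search direction: instead of scanning every keyword of five category sets for a substring hit, B indexes all keywords in one hash map keyword->(priority, entity), enumerates the bounded-length substrings of the normalized base, collects the (priority, entity) hits and returns the entity of the minimum-priority hit; the B-/I-/bare cases are unified into one prefix+base computation and the dict is built by a comprehension.
import Mathlib
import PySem

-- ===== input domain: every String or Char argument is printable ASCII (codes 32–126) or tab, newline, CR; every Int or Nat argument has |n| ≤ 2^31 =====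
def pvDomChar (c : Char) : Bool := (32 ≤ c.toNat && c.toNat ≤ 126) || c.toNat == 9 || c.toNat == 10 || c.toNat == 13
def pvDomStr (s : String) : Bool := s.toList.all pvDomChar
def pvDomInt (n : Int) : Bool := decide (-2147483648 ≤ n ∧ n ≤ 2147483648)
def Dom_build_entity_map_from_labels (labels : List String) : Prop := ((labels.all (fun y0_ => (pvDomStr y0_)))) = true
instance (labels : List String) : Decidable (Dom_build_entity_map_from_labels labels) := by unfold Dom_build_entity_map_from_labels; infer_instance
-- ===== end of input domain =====

-- B inverts the search: instead of scanning five keyword sets for a substring hit, it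
-- indexes all keywords in one map keyword -> (priority, entity), enumerates the
-- bounded-length substrings of the normalized base, and returns the entity of the
-- minimum-priority hit; same return value, a different (dict-indexed) algorithm.

-- ===== PORT A =====
def pvA_software_kw : PySem.Set String := PySem.Set.ofList
  ["application", "app", "software", "tool", "library", "framework", "package",
   "language", "programminglanguage", "ide", "editor", "browser",
   "database", "db", "sql", "nosql",
   "service", "cloud", "aws", "azure", "gcp",
   "kubernetes", "docker", "container",
   "api", "sdk", "platform", "runtime",
   "server", "client",
   "protocol", "http", "https", "tcp", "udp", "ssh", "ssl", "tls",
   "repo", "repository", "git", "github"]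

def pvA_os_kw : PySem.Set String := PySem.Set.ofList
  ["operatingsystem", "os", "windows", "linux", "ubuntu", "debian", "macos", "android", "ios"]

def pvA_hardware_kw : PySem.Set String := PySem.Set.ofList
  ["hardware", "device", "router", "switch", "cpu", "gpu", "disk", "ssd", "hdd", "ram", "laptop"]

def pvA_error_kw : PySem.Set String := PySem.Set.ofList
  ["error", "exception", "bug", "crash", "failure", "timeout", "stacktrace", "traceback"]

def pvA_version_kw : PySem.Set String := PySem.Set.ofList
  ["version", "release", "update", "patch", "build", "kb", "rc"]

-- def norm(s): return s.strip().lower().replace("_","").replace("-","").replace(" ","")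
def pvA_norm (s : String) : String :=
  PySem.Str.replace (PySem.Str.replace (PySem.Str.replace (PySem.Str.lower (PySem.Str.strip s)) "_" "") "-" "") " " ""

-- choose_entity: five any(k in b for k in …) scans, in A's order
def pvA_choose_entity (base : String) : String :=
  let b := pvA_norm base
  if pvA_os_kw.any (fun k => PySem.Str.isIn k b) then "OS"
  else if pvA_error_kw.any (fun k => PySem.Str.isIn k b) then "ERROR"
  else if pvA_version_kw.any (fun k => PySem.Str.isIn k b) then "VERSION"
  else if pvA_hardware_kw.any (fun k => PySem.Str.isIn k b) then "HARDWARE"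
  else if pvA_software_kw.any (fun k => PySem.Str.isIn k b) then "SOFTWARE"
  else "O"

-- the for-loop over labels building the dict (str(lab) is the identity on str inputs)
def build_entity_map_from_labels (labels : List String) : List (String × String) :=
  (labels.foldl (fun (mapping : PySem.Dict String String) lab =>
    if lab == "O" then mapping.insert lab "O"
    else if (PySem.Str.startswith lab "B-" || PySem.Str.startswith lab "I-") && decide (2 < PySem.Str.len lab) then
      let pref := PySem.Str.slice lab none (some 2)
      let base := PySem.Str.slice lab (some 2) none
      let ent := pvA_choose_entity base
      mapping.insert lab (if ent == "O" then "O" else pref ++ ent)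
    else
      let ent := pvA_choose_entity lab
      mapping.insert lab (if ent == "O" then "O" else "B-" ++ ent)) PySem.Dict.empty).items

-- ===== PORT B =====
-- _CATS: the (entity, keywords) categories in precedence order
def pvB_cats : List (String × List String) :=
  [("OS", ["operatingsystem", "os", "windows", "linux", "ubuntu", "debian", "macos", "android", "ios"]),
   ("ERROR", ["error", "exception", "bug", "crash", "failure", "timeout", "stacktrace", "traceback"]),
   ("VERSION", ["version", "release", "update", "patch", "build", "kb", "rc"]),
   ("HARDWARE", ["hardware", "device", "router", "switch", "cpu", "gpu", "disk", "ssd", "hdd", "ram", "laptop"]),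
   ("SOFTWARE",
    ["application", "app", "software", "tool", "library", "framework", "package",
     "language", "programminglanguage", "ide", "editor", "browser",
     "database", "db", "sql", "nosql",
     "service", "cloud", "aws", "azure", "gcp",
     "kubernetes", "docker", "container",
     "api", "sdk", "platform", "runtime",
     "server", "client",
     "protocol", "http", "https", "tcp", "udp", "ssh", "ssl", "tls",
     "repo", "repository", "git", "github"])]

-- _KW = {k: (p, ent) for p, (ent, kws) in enumerate(_CATS) for k in kws}
def pvB_pairs : List (String × (Int × String)) :=
  (PySem.List.enumerate pvB_cats 0).flatMap (fun pe => pe.2.2.map (fun k => (k, (pe.1, pe.2.1))))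

def pvB_kw : PySem.Dict String (Int × String) := PySem.Dict.ofList pvB_pairs

-- _MAXKW = 19 (the literal in Source B)
def pvB_maxkw : Nat := 19

-- 'if h is not None: hits.append(h)'
def pvB_step (hits : List (Int × String)) (h? : Option (Int × String)) : List (Int × String) :=
  match h? with
  | some h => hits ++ [h]
  | none => hits

-- the nested hit-collecting loop of _classify; b[i:i+L] with 0 ≤ i and 1 ≤ L is exactly
-- (toList.drop i).take L, and range(len(b)) / range(1, _MAXKW+1) are the Nat ranges below
def pvB_hits (b : String) : List (Int × String) :=
  (List.range b.toList.length).foldl (fun hits i =>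
    (List.range' 1 pvB_maxkw).foldl (fun hits L =>
      pvB_step hits (pvB_kw.get? (String.ofList ((b.toList.drop i).take L)))) hits) []

-- 'return "O" if not hits else min(hits, key=lambda h: h[0])[1]'
def pvB_classify (b : String) : String :=
  match PySem.List.min? (pvB_hits b) (fun h => h.1) with
  | some h => h.2
  | none => "O"

def pvB_norm (s : String) : String :=
  PySem.Str.replace (PySem.Str.replace (PySem.Str.replace (PySem.Str.lower (PySem.Str.strip s)) "_" "") "-" "") " " ""

-- _tag: the 'O' case, the unified prefix+base split, classify on the normalized base
def pvB_tag (lab : String) : String :=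
  if lab == "O" then "O"
  else
    let pb :=
      if (PySem.Str.startswith lab "B-" || PySem.Str.startswith lab "I-") && decide (2 < PySem.Str.len lab) then
        (PySem.Str.slice lab none (some 2), PySem.Str.slice lab (some 2) none)
      else ("B-", lab)
    let ent := pvB_classify (pvB_norm pb.2)
    if ent == "O" then "O" else pb.1 ++ ent

-- {lab: _tag(lab) for lab in map(str, labels)}  (str(lab) is the identity on str inputs)
def build_entity_map_from_labels_alt (labels : List String) : List (String × String) :=
  (labels.foldl (fun (mapping : PySem.Dict String String) lab =>
    mapping.insert lab (pvB_tag lab)) PySem.Dict.empty).items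

-- ===== PRECONDITION & SPEC =====
def Spec_build_entity_map_from_labels (labels : List String) (out : List (String × String)) : Prop := out = build_entity_map_from_labels_alt labels
instance (labels : List String) (out : List (String × String)) : Decidable (Spec_build_entity_map_from_labels labels out) := by unfold Spec_build_entity_map_from_labels; infer_instance

-- ===== CLAIM (what is proved, stated in full; the proofs are below) =====
def Claim_equal_build_entity_map_from_labels : Prop := ∀ (labels : List String), Dom_build_entity_map_from_labels labels → Spec_build_entity_map_from_labels labels (build_entity_map_from_labels labels)

-- ===== LEMMAS AND PROOFS =====

-- the five priorities, the entity and keyword list of each priority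
def pvPr5 : List Int := [0, 1, 2, 3, 4]

def pvEntOf (p : Int) : String :=
  match p with
  | 0 => "OS" | 1 => "ERROR" | 2 => "VERSION" | 3 => "HARDWARE" | _ => "SOFTWARE"

def pvCatOf (p : Int) : List String :=
  match p with
  | 0 => ["operatingsystem", "os", "windows", "linux", "ubuntu", "debian", "macos", "android", "ios"]
  | 1 => ["error", "exception", "bug", "crash", "failure", "timeout", "stacktrace", "traceback"]
  | 2 => ["version", "release", "update", "patch", "build", "kb", "rc"]
  | 3 => ["hardware", "device", "router", "switch", "cpu", "gpu", "disk", "ssd", "hdd", "ram", "laptop"]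
  | _ => ["application", "app", "software", "tool", "library", "framework", "package",
          "language", "programminglanguage", "ide", "editor", "browser",
          "database", "db", "sql", "nosql",
          "service", "cloud", "aws", "azure", "gcp",
          "kubernetes", "docker", "container",
          "api", "sdk", "platform", "runtime",
          "server", "client",
          "protocol", "http", "https", "tcp", "udp", "ssh", "ssl", "tls",
          "repo", "repository", "git", "github"]

-- category p has a keyword occurring in b
def pvHitCat (p : Int) (b : String) : Prop := ∃ k ∈ pvCatOf p, PySem.Str.isIn k b = true

-- closed facts about the literal keyword table
set_option maxRecDepth 16384 in
lemma pv_kw_items : pvB_kw.items = pvB_pairs := by decide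

set_option maxRecDepth 16384 in
lemma pv_kw_nodup : pvB_kw.keys.Nodup := by decide

lemma pv_pair_facts : ∀ q ∈ pvB_pairs, q.2.1 ∈ pvPr5 ∧ q.2.2 = pvEntOf q.2.1 ∧ q.1 ∈ pvCatOf q.2.1 := by decide

lemma pv_cat_pairs : ∀ p ∈ pvPr5, ∀ k ∈ pvCatOf p, (k, (p, pvEntOf p)) ∈ pvB_pairs := by decide

lemma pv_cat_len : ∀ p ∈ pvPr5, ∀ k ∈ pvCatOf p, 1 ≤ k.toList.length ∧ k.toList.length ≤ 19 := by decide

-- the 'if h is not None: hits.append(h)' inner loop is a filterMap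
lemma pv_foldl_opt {α : Type} (g : α → Option (Int × String)) (l : List α) (acc : List (Int × String)) :
    l.foldl (fun a x => pvB_step a (g x)) acc = acc ++ l.filterMap g := by
  induction l generalizing acc with
  | nil => simp
  | cons x xs ih =>
    simp only [List.foldl_cons, List.filterMap_cons]
    cases hg : g x with
    | none => exact ih acc
    | some h => exact (ih (acc ++ [h])).trans (by simp)

lemma pv_hits_eq (b : String) :
    pvB_hits b = (List.range b.toList.length).flatMap (fun i =>
      (List.range' 1 pvB_maxkw).filterMap (fun L =>
        pvB_kw.get? (String.ofList ((b.toList.drop i).take L)))) := by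
  unfold pvB_hits
  simp only [pv_foldl_opt, PySem.List.foldl_append_eq_flatMap, List.nil_append]

lemma pv_mem_hits (b : String) (h : Int × String) :
    h ∈ pvB_hits b ↔ ∃ i < b.toList.length, ∃ L ∈ List.range' 1 pvB_maxkw,
      pvB_kw.get? (String.ofList ((b.toList.drop i).take L)) = some h := by
  rw [pv_hits_eq]
  simp [List.mem_flatMap, List.mem_filterMap, List.mem_range]

-- every collected hit names a category that really occurs in b
lemma pv_hits_forward (b : String) (h : Int × String) (hm : h ∈ pvB_hits b) :
    h.1 ∈ pvPr5 ∧ h.2 = pvEntOf h.1 ∧ pvHitCat h.1 b := by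
  rw [pv_mem_hits] at hm
  obtain ⟨i, _, L, _, hg⟩ := hm
  have hitem := PySem.Dict.mem_items_of_get?_eq_some pvB_kw hg
  rw [pv_kw_items] at hitem
  obtain ⟨h5, hent, hcat⟩ := pv_pair_facts _ hitem
  refine ⟨h5, hent, String.ofList ((b.toList.drop i).take L), hcat, ?_⟩
  rw [PySem.Str.isIn_iff_infix, String.toList_ofList]
  exact (List.take_prefix L (b.toList.drop i)).isInfix.trans (List.drop_suffix i b.toList).isInfix

-- every category occurring in b is collected (with its priority and entity)
lemma pv_hits_backward (b : String) (p : Int) (hp : p ∈ pvPr5) (hc : pvHitCat p b) :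
    (p, pvEntOf p) ∈ pvB_hits b := by
  obtain ⟨k, hk, hin⟩ := hc
  rw [PySem.Str.isIn_iff_infix] at hin
  have hlen := pv_cat_len p hp k hk
  have hIn : PySem.Chars.isIn k.toList b.toList = true := (PySem.Chars.isIn_iff_infix _ _).mpr hin
  obtain ⟨j, hpref⟩ := (PySem.Chars.exists_prefix_drop_iff_isIn _ _).mpr hIn
  have hjlt : j < b.toList.length := by
    by_contra hge
    have : List.drop j b.toList = [] := List.drop_eq_nil_of_le (by omega)
    rw [this, List.prefix_nil] at hpref
    have := hlen.1
    simp [hpref] at this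
  rw [pv_mem_hits]
  refine ⟨j, hjlt, k.toList.length, ?_, ?_⟩
  · simp only [List.mem_range', pvB_maxkw]
    exact ⟨k.toList.length - 1, by omega, by omega⟩
  · have htake : (List.drop j b.toList).take k.toList.length = k.toList :=
      (List.prefix_iff_eq_take.mp hpref).symm
    rw [htake, String.ofList_toList]
    exact PySem.Dict.get?_of_mem_items pvB_kw
      (by rw [pv_kw_items]; exact pv_cat_pairs p hp k hk) pv_kw_nodup

-- the minimum-priority hit is the first category of the cascade that occurs
lemma pv_classify_of (b : String) (p : Int) (hp : p ∈ pvPr5) (hc : pvHitCat p b)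
    (hmin : ∀ q ∈ pvPr5, q < p → ¬ pvHitCat q b) : pvB_classify b = pvEntOf p := by
  have hmem := pv_hits_backward b p hp hc
  unfold pvB_classify
  cases hmn : PySem.List.min? (pvB_hits b) (fun h => h.1) with
  | none =>
    rw [PySem.List.min?_eq_none_iff] at hmn
    rw [hmn] at hmem
    simp at hmem
  | some m =>
    obtain ⟨hm5, hment, hmhit⟩ := pv_hits_forward b m (PySem.List.min?_mem hmn)
    have hle : m.1 ≤ p := PySem.List.min?_isMin hmn _ hmem
    have hnlt : ¬ m.1 < p := fun hlt => hmin m.1 hm5 hlt hmhit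
    have hmp : m.1 = p := by omega
    show m.2 = pvEntOf p
    rw [hment, hmp]

lemma pv_classify_none (b : String) (h : ∀ p ∈ pvPr5, ¬ pvHitCat p b) : pvB_classify b = "O" := by
  unfold pvB_classify
  cases hmn : PySem.List.min? (pvB_hits b) (fun h => h.1) with
  | none => rfl
  | some m =>
    obtain ⟨hm5, _, hmhit⟩ := pv_hits_forward b m (PySem.List.min?_mem hmn)
    exact absurd hmhit (h m.1 hm5)

-- any over Set.ofList = any over the underlying list (same members)
lemma pvSet_any (l : List String) (p : String → Bool) :
    (PySem.Set.ofList l).any p = l.any p := by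
  apply Bool.eq_iff_iff.mpr
  simp only [List.any_eq_true]
  constructor
  · rintro ⟨x, hx, hp⟩
    exact ⟨x, (PySem.Set.mem_ofList l x).mp hx, hp⟩
  · rintro ⟨x, hx, hp⟩
    exact ⟨x, (PySem.Set.mem_ofList l x).mpr hx, hp⟩

-- A's cascade of five scans = B's minimum-priority classification
lemma pvChoose_eq (s : String) : pvA_choose_entity s = pvB_classify (pvB_norm s) := by
  have hnorm : pvB_norm s = pvA_norm s := rfl
  rw [hnorm]
  unfold pvA_choose_entity
  have e0 : pvA_os_kw = PySem.Set.ofList (pvCatOf 0) := rfl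
  have e1 : pvA_error_kw = PySem.Set.ofList (pvCatOf 1) := rfl
  have e2 : pvA_version_kw = PySem.Set.ofList (pvCatOf 2) := rfl
  have e3 : pvA_hardware_kw = PySem.Set.ofList (pvCatOf 3) := rfl
  have e4 : pvA_software_kw = PySem.Set.ofList (pvCatOf 4) := rfl
  simp only [e0, e1, e2, e3, e4, pvSet_any, List.any_eq_true]
  set b := pvA_norm s with hb
  by_cases h0 : ∃ x ∈ pvCatOf 0, PySem.Str.isIn x b = true
  · rw [if_pos h0, pv_classify_of b 0 (by decide) h0
      (by intro q hq hlt; fin_cases hq <;> (exfalso; omega))]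
    rfl
  · rw [if_neg h0]
    by_cases h1 : ∃ x ∈ pvCatOf 1, PySem.Str.isIn x b = true
    · rw [if_pos h1, pv_classify_of b 1 (by decide) h1
        (by intro q hq hlt; fin_cases hq <;> first | exact h0 | (exfalso; omega))]
      rfl
    · rw [if_neg h1]
      by_cases h2 : ∃ x ∈ pvCatOf 2, PySem.Str.isIn x b = true
      · rw [if_pos h2, pv_classify_of b 2 (by decide) h2
          (by intro q hq hlt; fin_cases hq <;> first | exact h0 | exact h1 | (exfalso; omega))]
        rfl
      · rw [if_neg h2]
        by_cases h3 : ∃ x ∈ pvCatOf 3, PySem.Str.isIn x b = true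
        · rw [if_pos h3, pv_classify_of b 3 (by decide) h3
            (by intro q hq hlt; fin_cases hq <;> first | exact h0 | exact h1 | exact h2 | (exfalso; omega))]
          rfl
        · rw [if_neg h3]
          by_cases h4 : ∃ x ∈ pvCatOf 4, PySem.Str.isIn x b = true
          · rw [if_pos h4, pv_classify_of b 4 (by decide) h4
              (by intro q hq hlt; fin_cases hq <;> first | exact h0 | exact h1 | exact h2 | exact h3 | (exfalso; omega))]
            rfl
          · rw [if_neg h4, pv_classify_none b
              (by intro q hq; fin_cases hq <;> first | exact h0 | exact h1 | exact h2 | exact h3 | exact h4)]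

-- A's per-label inserted value, as a function of the label
def pvA_tag (lab : String) : String :=
  if lab == "O" then "O"
  else if (PySem.Str.startswith lab "B-" || PySem.Str.startswith lab "I-") && decide (2 < PySem.Str.len lab) then
    let ent := pvA_choose_entity (PySem.Str.slice lab (some 2) none)
    if ent == "O" then "O" else PySem.Str.slice lab none (some 2) ++ ent
  else
    let ent := pvA_choose_entity lab
    if ent == "O" then "O" else "B-" ++ ent

lemma pvA_step (mapping : PySem.Dict String String) (lab : String) :
    (if lab == "O" then mapping.insert lab "O"
     else if (PySem.Str.startswith lab "B-" || PySem.Str.startswith lab "I-") && decide (2 < PySem.Str.len lab) then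
       let pref := PySem.Str.slice lab none (some 2)
       let base := PySem.Str.slice lab (some 2) none
       let ent := pvA_choose_entity base
       mapping.insert lab (if ent == "O" then "O" else pref ++ ent)
     else
       let ent := pvA_choose_entity lab
       mapping.insert lab (if ent == "O" then "O" else "B-" ++ ent))
    = mapping.insert lab (pvA_tag lab) := by
  unfold pvA_tag
  split_ifs <;> rfl

-- the two per-label values coincide
lemma pvTag_eq (lab : String) : pvA_tag lab = pvB_tag lab := by
  unfold pvA_tag pvB_tag
  by_cases h0 : (lab == "O") = true
  · simp only [h0, if_true]
  · simp only [h0, if_false, Bool.false_eq_true]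
    by_cases h1 : ((PySem.Str.startswith lab "B-" || PySem.Str.startswith lab "I-") && decide (2 < PySem.Str.len lab)) = true
    · simp only [h1, if_true, pvChoose_eq]
    · simp only [h1, if_false, Bool.false_eq_true, pvChoose_eq]

-- ===== VERDICT (by name: the statement is the Claim_ definition above) =====
theorem build_entity_map_from_labels_spec : Claim_equal_build_entity_map_from_labels := by
  intro labels _
  unfold Spec_build_entity_map_from_labels build_entity_map_from_labels build_entity_map_from_labels_alt
  have hfun : (fun (mapping : PySem.Dict String String) lab =>
      if lab == "O" then mapping.insert lab "O"
      else if (PySem.Str.startswith lab "B-" || PySem.Str.startswith lab "I-") && decide (2 < PySem.Str.len lab) then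
        let pref := PySem.Str.slice lab none (some 2)
        let base := PySem.Str.slice lab (some 2) none
        let ent := pvA_choose_entity base
        mapping.insert lab (if ent == "O" then "O" else pref ++ ent)
      else
        let ent := pvA_choose_entity lab
        mapping.insert lab (if ent == "O" then "O" else "B-" ++ ent))
      = (fun (mapping : PySem.Dict String String) lab => mapping.insert lab (pvB_tag lab)) := by
    funext mapping lab
    rw [pvA_step, pvTag_eq]
  rw [hfun]
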